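-- pv_equiv track=rewrite | github.com/IGuanggg/Very_Hunger | ele_tyt.py | reorder_ck
-- ===== SOURCE A (Python) =====
-- def reorder_ck(s: str) -> str:
--     order = ["cookie2", "sgcookie", "unb", "USERID", "SID", "token", "utdid", "deviceId", "umt"]
--     cookies = s.split(';')
--     cookie_dict = {}
--     for cookie in cookies:
--         key_value = cookie.split('=', 1)
--         if len(key_value) == 2:
--             key, value = key_value
--             cookie_dict[key.strip()] = value.strip()
--     reordered_cookies = []
--     for key in order:
--         if key in cookie_dict:
--             reordered_cookies.append(f"{key}={cookie_dict[key]}")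
--     return ';'.join(reordered_cookies) + ';'
-- ===== SOURCE B (Python) =====
-- def reorder_ck(s: str) -> str:
--     order = ["cookie2", "sgcookie", "unb", "USERID", "SID", "token", "utdid", "deviceId", "umt"]
--     frags = s.split(';')
--     out = []
--     for key in order:
--         found = None
--         for frag in frags:
--             kv = frag.split('=', 1)
--             if len(kv) == 2 and kv[0].strip() == key:
--                 found = kv[1].strip()
--         if found is not None:
--             out.append(f"{key}={found}")
--     return ';'.join(out) + ';'
-- ===== Notes on version B (the rewrite author's own statement) =====
-- stated objective: alternative
-- what changed: B drops the intermediate dict entirely: for each key of the fixed order it rescans the raw fragment list, keeping the last fragment whose stripped key matches, instead of A's build-an-index-then-look-up strategy.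
import Mathlib
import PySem

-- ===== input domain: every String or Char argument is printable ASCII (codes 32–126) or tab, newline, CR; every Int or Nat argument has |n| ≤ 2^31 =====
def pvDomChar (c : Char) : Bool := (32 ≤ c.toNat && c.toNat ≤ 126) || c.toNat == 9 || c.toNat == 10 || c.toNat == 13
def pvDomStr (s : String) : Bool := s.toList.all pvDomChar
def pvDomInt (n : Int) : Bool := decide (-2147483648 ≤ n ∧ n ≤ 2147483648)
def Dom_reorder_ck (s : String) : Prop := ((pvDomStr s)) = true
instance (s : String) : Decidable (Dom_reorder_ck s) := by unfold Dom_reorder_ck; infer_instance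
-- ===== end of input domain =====

-- B drops A's intermediate dict: per fixed-order key it rescans the fragments, keeping the
-- last match (alternative decomposition, same cost class; return values proved equal).

-- ===== PORT A =====
def reorder_ck (s : String) : String :=
  let order : List String := ["cookie2", "sgcookie", "unb", "USERID", "SID", "token", "utdid", "deviceId", "umt"]
  let cookies := (PySem.Str.split? s ";").getD []
  let cookieDict := cookies.foldl (fun d cookie =>
    let kv := (PySem.Str.splitMax? cookie "=" 1).getD []
    if kv.length = 2 then
      d.insert (PySem.Str.strip (kv.getD 0 "")) (PySem.Str.strip (kv.getD 1 ""))
    else d) (PySem.Dict.empty : PySem.Dict String String)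
  let reordered := order.foldl (fun acc key =>
    match cookieDict.get? key with
    | some v => acc ++ [key ++ "=" ++ v]
    | none => acc) []
  PySem.Str.join ";" reordered ++ ";"

-- ===== PORT B =====
-- last fragment (in list order) whose stripped key equals `key`, as in Source B's inner loop
def lastMatch (frags : List String) (key : String) : Option String :=
  frags.foldl (fun acc frag =>
    let kv := (PySem.Str.splitMax? frag "=" 1).getD []
    if kv.length = 2 ∧ PySem.Str.strip (kv.getD 0 "") = key then
      some (PySem.Str.strip (kv.getD 1 ""))
    else acc) none

def reorder_ck_alt (s : String) : String :=
  let order : List String := ["cookie2", "sgcookie", "unb", "USERID", "SID", "token", "utdid", "deviceId", "umt"]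
  let frags := (PySem.Str.split? s ";").getD []
  let out := order.foldl (fun acc key =>
    match lastMatch frags key with
    | some v => acc ++ [key ++ "=" ++ v]
    | none => acc) []
  PySem.Str.join ";" out ++ ";"

-- ===== PRECONDITION & SPEC =====
def Spec_reorder_ck (s : String) (out : String) : Prop := out = reorder_ck_alt s
instance (s : String) (out : String) : Decidable (Spec_reorder_ck s out) := by unfold Spec_reorder_ck; infer_instance

-- ===== CLAIM (what is proved, stated in full; the proofs are below) =====
def Claim_equal_reorder_ck : Prop := ∀ (s : String), Dom_reorder_ck s → Spec_reorder_ck s (reorder_ck s)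

-- ===== LEMMAS AND PROOFS =====

-- A's dict lookup after the build loop equals B's last-match scan (generalized over the
-- starting dict / accumulator so the induction goes through).
lemma get?_build_eq_scan (frags : List String) (d : PySem.Dict String String) (key : String) :
    (frags.foldl (fun d cookie =>
      let kv := (PySem.Str.splitMax? cookie "=" 1).getD []
      if kv.length = 2 then
        d.insert (PySem.Str.strip (kv.getD 0 "")) (PySem.Str.strip (kv.getD 1 ""))
      else d) d).get? key =
    frags.foldl (fun acc frag =>
      let kv := (PySem.Str.splitMax? frag "=" 1).getD []
      if kv.length = 2 ∧ PySem.Str.strip (kv.getD 0 "") = key then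
        some (PySem.Str.strip (kv.getD 1 ""))
      else acc) (d.get? key) := by
  induction frags generalizing d with
  | nil => rfl
  | cons f rest ih =>
    simp only [List.foldl_cons]
    rw [ih]
    congr 1
    dsimp only
    split_ifs with h1 h2 h2
    · rw [PySem.Dict.get?_insert, if_pos h2.2.symm]
    · rw [PySem.Dict.get?_insert, if_neg]
      intro hk; exact h2 ⟨h1, hk.symm⟩
    · exact absurd h2.1 h1
    · rfl

lemma get?_eq_lastMatch (frags : List String) (key : String) :
    (frags.foldl (fun d cookie =>
      let kv := (PySem.Str.splitMax? cookie "=" 1).getD []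
      if kv.length = 2 then
        d.insert (PySem.Str.strip (kv.getD 0 "")) (PySem.Str.strip (kv.getD 1 ""))
      else d) (PySem.Dict.empty : PySem.Dict String String)).get? key = lastMatch frags key := by
  rw [lastMatch, ← PySem.Dict.get?_empty (κ := String) (ν := String) key]
  exact get?_build_eq_scan frags PySem.Dict.empty key

-- ===== VERDICT (by name: the statement is the Claim_ definition above) =====
theorem reorder_ck_spec : Claim_equal_reorder_ck := by
  intro s _
  show reorder_ck s = reorder_ck_alt s
  simp only [reorder_ck, reorder_ck_alt]
  simp only [get?_eq_lastMatch]
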